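-- pv_equiv track=rewrite | github.com/IsakGairatov/KBTU_learning | Python_learning/Lab2/Lab2 J.py | Check
-- ===== SOURCE A (Python) =====
-- def Check(x):
--     up, lo, nu = 0, 0, 0
--     for i in x:
--         if up + lo + nu == 3:
--             break
--         elif ord('A') <= ord(i) <= ord('Z'):
--             up = 1
--         elif ord('a') <= ord(i) <= ord('z'):
--             lo = 1
--         elif ord('0') <= ord(i) <= ord('9'):
--             nu = 1
--     return (up + lo + nu) // 3
-- ===== SOURCE B (Python) =====
-- def Check(x):
--     has_upper = any('A' <= c <= 'Z' for c in x)
--     has_lower = any('a' <= c <= 'z' for c in x)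
--     has_digit = any('0' <= c <= '9' for c in x)
--     return int(has_upper and has_lower and has_digit)
-- ===== Notes on version B (the rewrite author's own statement) =====
-- stated objective: simpler
-- what changed: Replaces the single stateful loop with three integer flags and a break-and-floor-division finish by three independent short-circuiting any() passes over explicit ASCII ranges, returning int of their conjunction.
import Mathlib
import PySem

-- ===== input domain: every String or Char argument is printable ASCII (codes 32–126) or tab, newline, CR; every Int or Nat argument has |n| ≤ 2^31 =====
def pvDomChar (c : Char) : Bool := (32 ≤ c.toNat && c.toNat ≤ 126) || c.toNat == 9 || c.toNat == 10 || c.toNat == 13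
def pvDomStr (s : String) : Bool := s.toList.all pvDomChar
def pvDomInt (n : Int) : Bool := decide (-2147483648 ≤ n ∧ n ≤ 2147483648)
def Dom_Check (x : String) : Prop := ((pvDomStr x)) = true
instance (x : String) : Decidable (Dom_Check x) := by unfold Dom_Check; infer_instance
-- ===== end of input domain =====

-- B replaces A's single stateful flag loop (with break and //3) by three independent
-- short-circuiting any() passes over explicit ASCII ranges; simpler decomposition.

-- ===== PORT A =====
-- the for-loop of A, carrying the three flags; the 'break' is the first branch
def checkLoop : List Char → Int → Int → Int → Int × Int × Int
  | [], up, lo, nu => (up, lo, nu)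
  | c :: cs, up, lo, nu =>
    if up + lo + nu == 3 then (up, lo, nu)
    else if 65 ≤ c.toNat ∧ c.toNat ≤ 90 then checkLoop cs 1 lo nu
    else if 97 ≤ c.toNat ∧ c.toNat ≤ 122 then checkLoop cs up 1 nu
    else if 48 ≤ c.toNat ∧ c.toNat ≤ 57 then checkLoop cs up lo 1
    else checkLoop cs up lo nu

def Check (x : String) : Int :=
  let p := checkLoop x.toList 0 0 0
  PySem.Int.floordiv (p.1 + p.2.1 + p.2.2) 3

-- ===== PORT B =====
def Check_alt (x : String) : Int :=
  let cs := x.toList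
  let hasUpper := cs.any (fun c => decide (65 ≤ c.toNat ∧ c.toNat ≤ 90))
  let hasLower := cs.any (fun c => decide (97 ≤ c.toNat ∧ c.toNat ≤ 122))
  let hasDigit := cs.any (fun c => decide (48 ≤ c.toNat ∧ c.toNat ≤ 57))
  if hasUpper && hasLower && hasDigit then 1 else 0

-- ===== PRECONDITION & SPEC =====
def Spec_Check (x : String) (out : Int) : Prop := out = Check_alt x
instance (x : String) (out : Int) : Decidable (Spec_Check x out) := by unfold Spec_Check; infer_instance

-- ===== CLAIM (what is proved, stated in full; the proofs are below) =====
def Claim_equal_Check : Prop := ∀ (x : String), Dom_Check x → Spec_Check x (Check x)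

-- ===== LEMMAS AND PROOFS =====
theorem checkLoop_char (cs : List Char) (up lo nu : Int)
    (hu : up = 0 ∨ up = 1) (hl : lo = 0 ∨ lo = 1) (hn : nu = 0 ∨ nu = 1) :
    checkLoop cs up lo nu =
      ((if up = 1 ∨ cs.any (fun c => decide (65 ≤ c.toNat ∧ c.toNat ≤ 90)) then 1 else 0),
       (if lo = 1 ∨ cs.any (fun c => decide (97 ≤ c.toNat ∧ c.toNat ≤ 122)) then 1 else 0),
       (if nu = 1 ∨ cs.any (fun c => decide (48 ≤ c.toNat ∧ c.toNat ≤ 57)) then 1 else 0)) := by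
  induction cs generalizing up lo nu with
  | nil =>
    rcases hu with h | h <;> rcases hl with h' | h' <;> rcases hn with h'' | h'' <;>
      subst h <;> subst h' <;> subst h'' <;> decide
  | cons c cs ih =>
    simp only [checkLoop]
    by_cases hb : up + lo + nu = 3
    · have hu1 : up = 1 := by omega
      have hl1 : lo = 1 := by omega
      have hn1 : nu = 1 := by omega
      subst hu1; subst hl1; subst hn1
      have h3 : ((1:Int) + 1 + 1 == 3) = true := by decide
      rw [if_pos h3]
      norm_num
    · have hb' : (up + lo + nu == 3) = false := beq_eq_false_iff_ne.mpr hb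
      rw [hb']
      simp only [Bool.false_eq_true, if_false]
      by_cases h1 : 65 ≤ c.toNat ∧ c.toNat ≤ 90
      · have d1 : ¬(97 ≤ c.toNat ∧ c.toNat ≤ 122) := by omega
        have d2 : ¬(48 ≤ c.toNat ∧ c.toNat ≤ 57) := by omega
        rw [if_pos h1, ih 1 lo nu (Or.inr rfl) hl hn]
        simp [h1, d1, d2]
      · rw [if_neg h1]
        by_cases h2 : 97 ≤ c.toNat ∧ c.toNat ≤ 122
        · have d2 : ¬(48 ≤ c.toNat ∧ c.toNat ≤ 57) := by omega
          rw [if_pos h2, ih up 1 nu hu (Or.inr rfl) hn]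
          simp [h1, h2, d2]
        · rw [if_neg h2]
          by_cases h3 : 48 ≤ c.toNat ∧ c.toNat ≤ 57
          · rw [if_pos h3, ih up lo 1 hu hl (Or.inr rfl)]
            simp [h1, h2, h3]
          · rw [if_neg h3, ih up lo nu hu hl hn]
            simp [h1, h2, h3]

theorem indicator_sum_floordiv (b1 b2 b3 : Bool) :
    PySem.Int.floordiv
      ((if (0:Int) = 1 ∨ b1 = true then (1:Int) else 0) +
       (if (0:Int) = 1 ∨ b2 = true then (1:Int) else 0) +
       (if (0:Int) = 1 ∨ b3 = true then (1:Int) else 0)) 3 =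
    (if (b1 && b2 && b3) = true then (1:Int) else 0) := by
  cases b1 <;> cases b2 <;> cases b3 <;> decide

-- ===== VERDICT (by name: the statement is the Claim_ definition above) =====
theorem Check_spec : Claim_equal_Check := by
  intro x _
  unfold Spec_Check Check Check_alt
  rw [checkLoop_char x.toList 0 0 0 (Or.inl rfl) (Or.inl rfl) (Or.inl rfl)]
  exact indicator_sum_floordiv _ _ _
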